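-- pv_equiv track=rewrite | github.com/AliFazelniya/Neicharan-s-Dooz-with-Minimax-algorithm | Neicharan's Dooz - Main.py | agent_counter
-- ===== SOURCE A (Python) =====
-- def agent_counter(arr):
--     # Var to store all points in a line.
--     agent_points = 0
--     # Var to calculate all cells that are O in a line.
--     agent_points_counter = 0
--     # Checking all cells in line.
--     for i in arr:
--         # Check if the cell is O or not:
--         if i == "O":
--             # If O then user_points_counter + 1
--             agent_points_counter += 1
--         else:
--             # If not check if agent_points_counter >= 3. It means that there and 3 or more O cell in a row.
--             if agent_points_counter >= 3:
--                 # If there and 3 or more O cell in a row then store points in agent_points.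
--                 agent_points += agent_points_counter
--             # agent_points_counter = 0 to calculate points for next cells.
--             agent_points_counter = 0
--     # Store points if all cells in line are O (abardooz).
--     if agent_points_counter >= 3:
--         agent_points += agent_points_counter
--     return agent_points
-- ===== SOURCE B (Python) =====
-- def agent_counter(arr):
--     # Sliding-window count: each all-"O" window of length 3 adds 1, except a
--     # window that STARTS a run (no "O" just before it) adds 3; a run of length
--     # L >= 3 thus contributes 3 + (L - 3) = L, runs shorter than 3 contribute 0.
--     total = 0
--     for i in range(len(arr) - 2):
--         if arr[i] == "O" and arr[i + 1] == "O" and arr[i + 2] == "O":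
--             total += 3 if i == 0 or arr[i - 1] != "O" else 1
--     return total
-- ===== Notes on version B (the rewrite author's own statement) =====
-- stated objective: alternative
-- what changed: Replaces A's run-length state machine by a sliding-window count over index triples: every all-'O' window of length 3 adds 1, except a window starting a run (i==0 or arr[i-1] != 'O') which adds 3, using the identity L = 3 + (L-3) for each run of length L >= 3.
import Mathlib
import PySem

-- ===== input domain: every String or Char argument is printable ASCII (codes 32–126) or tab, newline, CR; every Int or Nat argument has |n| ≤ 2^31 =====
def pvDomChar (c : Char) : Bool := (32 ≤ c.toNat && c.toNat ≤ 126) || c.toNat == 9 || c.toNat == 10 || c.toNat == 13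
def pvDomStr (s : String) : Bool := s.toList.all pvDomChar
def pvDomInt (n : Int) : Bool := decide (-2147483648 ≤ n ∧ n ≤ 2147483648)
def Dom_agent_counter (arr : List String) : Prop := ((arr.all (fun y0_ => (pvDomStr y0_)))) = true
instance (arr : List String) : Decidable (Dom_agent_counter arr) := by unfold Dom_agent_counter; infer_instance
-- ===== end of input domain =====

-- B replaces A's run-length state machine by a sliding-window count over index
-- triples (window starting a run adds 3, inner window adds 1): alternative algorithm, same cost.


-- ===== PORT A =====
-- literal port of A: fold over arr carrying (agent_points, agent_points_counter),
-- then the final 'abardooz' check after the loop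
def agent_counter (arr : List String) : Int :=
  let s := arr.foldl
    (fun (st : Int × Int) i =>
      if i = "O" then (st.1, st.2 + 1)
      else if st.2 ≥ 3 then (st.1 + st.2, 0) else (st.1, 0))
    (0, 0)
  if s.2 ≥ 3 then s.1 + s.2 else s.1

-- ===== PORT B =====
-- port of Source B: for i in range(len(arr)-2), an all-"O" window arr[i..i+2] adds
-- 3 when it starts a run (i == 0 or arr[i-1] != "O"), else 1
def agent_counter_alt (arr : List String) : Int :=
  (PySem.List.pyRange 0 ((arr.length : Int) - 2) 1).foldl
    (fun total i =>
      if PySem.List.pyGetD arr i "" = "O" ∧ PySem.List.pyGetD arr (i + 1) "" = "O" ∧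
          PySem.List.pyGetD arr (i + 2) "" = "O" then
        total + (if i = 0 ∨ ¬ PySem.List.pyGetD arr (i - 1) "" = "O" then 3 else 1)
      else total)
    0

-- ===== PRECONDITION & SPEC =====
def Spec_agent_counter (arr : List String) (out : Int) : Prop := out = agent_counter_alt arr
instance (arr : List String) (out : Int) : Decidable (Spec_agent_counter arr out) := by unfold Spec_agent_counter; infer_instance

-- ===== CLAIM (what is proved, stated in full; the proofs are below) =====
def Claim_equal_agent_counter : Prop := ∀ (arr : List String), Dom_agent_counter arr → Spec_agent_counter arr (agent_counter arr)

-- ===== LEMMAS AND PROOFS =====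

-- A's loop step and the final check, named for the proofs
def pvStep (st : Int × Int) (i : String) : Int × Int :=
  if i = "O" then (st.1, st.2 + 1)
  else if st.2 ≥ 3 then (st.1 + st.2, 0) else (st.1, 0)

def pvFinish (st : Int × Int) : Int := if st.2 ≥ 3 then st.1 + st.2 else st.1

lemma A_unfold (arr : List String) :
    agent_counter arr = pvFinish (arr.foldl pvStep (0, 0)) := rfl

-- B's window term at Nat index i, with 'prev' = whether the element before index 0 is "O"
def pvW (prev : Bool) (arr : List String) (i : Nat) : Int :=
  if arr.getD i "" = "O" ∧ arr.getD (i + 1) "" = "O" ∧ arr.getD (i + 2) "" = "O" then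
    (if (if i = 0 then prev = true else arr.getD (i - 1) "" = "O") then 1 else 3)
  else 0

def pvSumW (prev : Bool) (arr : List String) : Int :=
  ((List.range (arr.length - 2)).map (pvW prev arr)).sum

-- structural (front-to-back) version of the window sum
def pvS : Bool → List String → Int
  | _, [] => 0
  | prev, y :: ys =>
      (if y = "O" ∧ ys.getD 0 "" = "O" ∧ ys.getD 1 "" = "O" then (if prev then 1 else 3) else 0)
      + pvS (decide (y = "O")) ys

-- shifting one element off the front of the list shifts the window term
lemma pvW_shift (prev : Bool) (y : String) (ys : List String) (i : Nat) :
    pvW prev (y :: ys) (i + 1) = pvW (decide (y = "O")) ys i := by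
  cases i with
  | zero => simp [pvW]
  | succ n => simp [pvW]

lemma sumW_cons (prev : Bool) (y : String) (ys : List String) :
    pvSumW prev (y :: ys)
      = (if y = "O" ∧ ys.getD 0 "" = "O" ∧ ys.getD 1 "" = "O" then (if prev then 1 else 3) else 0)
        + pvSumW (decide (y = "O")) ys := by
  match ys with
  | [] => simp [pvSumW]
  | [y2] => simp [pvSumW]
  | y2 :: y3 :: ys3 =>
    have hlen : (y :: y2 :: y3 :: ys3).length - 2 = ((y2 :: y3 :: ys3).length - 2) + 1 := by
      simp
    rw [pvSumW, hlen, List.range_succ_eq_map]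
    simp only [List.map_cons, List.map_map, List.sum_cons]
    have hmap : (pvW prev (y :: y2 :: y3 :: ys3) ∘ fun i => i + 1)
        = pvW (decide (y = "O")) (y2 :: y3 :: ys3) := by
      funext i
      exact pvW_shift prev y (y2 :: y3 :: ys3) i
    rw [hmap]
    have h0 : pvW prev (y :: y2 :: y3 :: ys3) 0
        = (if y = "O" ∧ (y2 :: y3 :: ys3).getD 0 "" = "O" ∧ (y2 :: y3 :: ys3).getD 1 "" = "O"
            then (if prev then 1 else 3) else 0) := by
      simp [pvW, List.getD]
    rw [h0]
    rfl

lemma sumW_eq_S (arr : List String) : ∀ prev, pvSumW prev arr = pvS prev arr := by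
  induction arr with
  | nil => intro prev; simp [pvSumW, pvS]
  | cons y ys ih =>
    intro prev
    rw [sumW_cons, pvS, ih]

-- bridge: the pyRange fold of port B is the window sum with prev = false
lemma alt_eq_sumW (arr : List String) : agent_counter_alt arr = pvSumW false arr := by
  unfold agent_counter_alt pvSumW
  rw [PySem.List.pyRange_one]
  rw [List.foldl_map]
  have htn : ((arr.length : Int) - 2 - 0).toNat = arr.length - 2 := by omega
  rw [htn]
  have hbody : (fun (total : Int) (k : Nat) =>
      if PySem.List.pyGetD arr ((0 : Int) + (k : Int)) "" = "O" ∧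
          PySem.List.pyGetD arr ((0 : Int) + (k : Int) + 1) "" = "O" ∧
          PySem.List.pyGetD arr ((0 : Int) + (k : Int) + 2) "" = "O" then
        total + (if (0 : Int) + (k : Int) = 0 ∨ ¬ PySem.List.pyGetD arr ((0 : Int) + (k : Int) - 1) "" = "O" then 3 else 1)
      else total)
      = fun (total : Int) (k : Nat) => total + pvW false arr k := by
    funext total k
    have h1 : (0 : Int) + (k : Int) = ((k : Nat) : Int) := by ring
    have h2 : (0 : Int) + (k : Int) + 1 = ((k + 1 : Nat) : Int) := by push_cast; ring
    have h3 : (0 : Int) + (k : Int) + 2 = ((k + 2 : Nat) : Int) := by push_cast; ring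
    rw [h3, h2, h1, PySem.List.pyGetD_natCast, PySem.List.pyGetD_natCast,
      PySem.List.pyGetD_natCast]
    cases k with
    | zero =>
      simp only [pvW, Nat.cast_zero, Nat.zero_sub]
      split_ifs with hc <;> simp_all
    | succ n =>
      have h4 : ((n + 1 : Nat) : Int) - 1 = ((n : Nat) : Int) := by push_cast; ring
      have h5 : ¬ ((n + 1 : Nat) : Int) = 0 := by omega
      rw [h4, PySem.List.pyGetD_natCast]
      simp only [pvW, h5, false_or, Nat.add_sub_cancel]
      have h6 : ¬ (n + 1 = 0) := by omega
      simp only [h6, if_false]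
      split_ifs <;> simp_all
  rw [hbody, PySem.List.foldl_add, zero_add]

-- ===== A-side loop lemmas =====

-- the points accumulator is additive in the fold
lemma foldl_step_shift (l : List String) : ∀ (p d : Int),
    l.foldl pvStep (p, d) = (p + (l.foldl pvStep (0, d)).1, (l.foldl pvStep (0, d)).2) := by
  induction l with
  | nil => intro p d; simp
  | cons x xs ih =>
    intro p d
    by_cases hx : x = "O"
    · simp only [List.foldl_cons, pvStep, hx, if_true]
      exact ih p (d + 1)
    · by_cases hd : d ≥ 3
      · simp only [List.foldl_cons, pvStep, hx, if_false, hd, if_true, zero_add]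
        rw [ih (p + d) 0, ih d 0]
        simp [add_assoc]
      · simp only [List.foldl_cons, pvStep, hx, if_false, hd]
        exact ih p 0

lemma foldl_step_repl (c : Nat) : ∀ (p d : Int),
    (List.replicate c "O").foldl pvStep (p, d) = (p, d + c) := by
  induction c with
  | zero => intro p d; simp
  | succ c ih =>
    intro p d
    rw [List.replicate_succ, List.foldl_cons]
    have : pvStep (p, d) "O" = (p, d + 1) := by simp [pvStep]
    rw [this, ih]
    simp [Prod.ext_iff]
    ring

lemma A_cons_ne (x : String) (hx : x ≠ "O") (xs : List String) :
    agent_counter (x :: xs) = agent_counter xs := by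
  rw [A_unfold, A_unfold, List.foldl_cons]
  have : pvStep (0, 0) x = (0, 0) := by simp [pvStep, hx]
  rw [this]

lemma A_repl_nil (c : Nat) :
    agent_counter (List.replicate c "O") = if 3 ≤ c then (c : Int) else 0 := by
  rw [A_unfold, foldl_step_repl, pvFinish]
  simp only [zero_add]
  split_ifs with h1 h2 h2 <;> push_cast at * <;> omega

lemma A_repl_cons (c : Nat) (x : String) (hx : x ≠ "O") (xs : List String) :
    agent_counter (List.replicate c "O" ++ x :: xs)
      = (if 3 ≤ c then (c : Int) else 0) + agent_counter xs := by
  rw [A_unfold, List.foldl_append, foldl_step_repl, List.foldl_cons]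
  have hstep : pvStep (0, (0 : Int) + c) x = ((if 3 ≤ c then (c : Int) else 0), 0) := by
    simp only [pvStep, hx, if_false, zero_add]
    split_ifs with h1 h2 h2 <;> push_cast at * <;> first | rfl | omega
  rw [hstep, foldl_step_shift]
  rw [A_unfold]
  unfold pvFinish
  split_ifs <;> ring

-- ===== pvS run lemmas =====

lemma pvS_cons_ne (prev : Bool) (x : String) (hx : x ≠ "O") (xs : List String) :
    pvS prev (x :: xs) = pvS false xs := by
  simp [pvS, hx]

lemma pvS_indep (prev prev' : Bool) (rest : List String)
    (h : rest = [] ∨ ∃ x xs, rest = x :: xs ∧ x ≠ "O") :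
    pvS prev rest = pvS prev' rest := by
  rcases h with h | ⟨x, xs, rfl, hx⟩
  · subst h; rfl
  · rw [pvS_cons_ne prev x hx, pvS_cons_ne prev' x hx]

lemma pvS_true_run (c : Nat) (rest : List String)
    (h : rest = [] ∨ ∃ x xs, rest = x :: xs ∧ x ≠ "O") :
    pvS true (List.replicate c "O" ++ rest)
      = (if 3 ≤ c then (c : Int) - 2 else 0) + pvS true rest := by
  induction c with
  | zero => simp
  | succ c ih =>
    rw [List.replicate_succ, List.cons_append, pvS]
    have hw : (if ("O" : String) = "O" ∧ (List.replicate c "O" ++ rest).getD 0 "" = "O" ∧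
          (List.replicate c "O" ++ rest).getD 1 "" = "O" then (if (true : Bool) then 1 else 3) else (0 : Int))
        = if 2 ≤ c then 1 else 0 := by
      match c with
      | 0 =>
        rcases h with rfl | ⟨x, xs, rfl, hx⟩
        · simp
        · simp [List.getD, hx]
      | 1 =>
        rcases h with rfl | ⟨x, xs, rfl, hx⟩
        · simp
        · simp [List.replicate_succ, List.getD, hx]
      | Nat.succ (Nat.succ c') => simp [List.replicate_succ]
    have hS : pvS (decide (("O" : String) = "O")) (List.replicate c "O" ++ rest)
        = pvS true (List.replicate c "O" ++ rest) := by norm_num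
    rw [hw, hS, ih]
    split_ifs <;> push_cast <;> omega

lemma pvS_false_run (c : Nat) (rest : List String)
    (h : rest = [] ∨ ∃ x xs, rest = x :: xs ∧ x ≠ "O") :
    pvS false (List.replicate c "O" ++ rest)
      = (if 3 ≤ c then (c : Int) else 0) + pvS true rest := by
  match c with
  | 0 =>
    simp only [List.replicate_zero, List.nil_append]
    rw [pvS_indep false true rest h]
    simp
  | Nat.succ c =>
    rw [List.replicate_succ, List.cons_append, pvS]
    have hw : (if ("O" : String) = "O" ∧ (List.replicate c "O" ++ rest).getD 0 "" = "O" ∧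
          (List.replicate c "O" ++ rest).getD 1 "" = "O" then (if (false : Bool) then 1 else 3) else (0 : Int))
        = if 2 ≤ c then 3 else 0 := by
      match c with
      | 0 =>
        rcases h with rfl | ⟨x, xs, rfl, hx⟩
        · simp
        · simp [List.getD, hx]
      | 1 =>
        rcases h with rfl | ⟨x, xs, rfl, hx⟩
        · simp
        · simp [List.replicate_succ, List.getD, hx]
      | Nat.succ (Nat.succ c') => simp [List.replicate_succ]
    have hS : pvS (decide (("O" : String) = "O")) (List.replicate c "O" ++ rest)
        = pvS true (List.replicate c "O" ++ rest) := by norm_num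
    rw [hw, hS, pvS_true_run c rest h]
    split_ifs <;> push_cast <;> omega

-- shape of dropWhile: empty or headed by an element failing the predicate
lemma dropWhile_shape (p : String → Bool) (l : List String) :
    l.dropWhile p = [] ∨ ∃ x xs, l.dropWhile p = x :: xs ∧ p x = false := by
  induction l with
  | nil => left; rfl
  | cons y ys ih =>
    by_cases hy : p y
    · simpa [hy] using ih
    · right
      exact ⟨y, ys, by simp [hy], by simpa using hy⟩

-- main: A equals the structural window sum
lemma A_eq_S : ∀ (N : Nat) (arr : List String), arr.length ≤ N →
    agent_counter arr = pvS false arr := by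
  intro N
  induction N with
  | zero =>
    intro arr h
    have : arr = [] := List.eq_nil_of_length_eq_zero (Nat.le_zero.mp h)
    subst this; rfl
  | succ N ih =>
    intro arr h
    match arr with
    | [] => rfl
    | x :: xs =>
      by_cases hx : x = "O"
      · -- split off the leading run of "O"s
        subst hx
        set p : String → Bool := fun s => decide (s = "O") with hp
        set t := ("O" :: xs).takeWhile p with ht
        set r := ("O" :: xs).dropWhile p with hr
        have htr : t ++ r = "O" :: xs := List.takeWhile_append_dropWhile
        have ht_repl : t = List.replicate t.length "O" := by
          rw [List.eq_replicate_iff]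
          refine ⟨rfl, fun b hb => ?_⟩
          have := List.mem_takeWhile_imp hb
          simpa [hp] using this
        have hrun : r = [] ∨ ∃ y ys, r = y :: ys ∧ y ≠ "O" := by
          rcases dropWhile_shape p ("O" :: xs) with h0 | ⟨y, ys, hy, hpy⟩
          · left; exact h0
          · right; exact ⟨y, ys, hy, by simpa [hp] using hpy⟩
        have htlen : 1 ≤ t.length := by
          rw [ht]
          simp [hp]
        have hlen_sum : t.length + r.length = xs.length + 1 := by
          have := congrArg List.length htr
          simpa using this
        rcases hrun with hnil | ⟨y, ys, hy, hyO⟩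
        · -- whole list is one run of "O"s
          have harr : ("O" :: xs) = List.replicate t.length "O" := by
            rw [← htr, hnil, List.append_nil, ← ht_repl]
          rw [harr, A_repl_nil]
          rw [show (List.replicate t.length "O" : List String)
              = List.replicate t.length "O" ++ ([] : List String) by simp]
          rw [pvS_false_run t.length [] (Or.inl rfl)]
          simp [pvS]
        · have harr : ("O" :: xs) = List.replicate t.length "O" ++ y :: ys := by
            rw [← htr, hy, ← ht_repl]
          have hys_len : ys.length ≤ N := by
            have hr1 : r.length = ys.length + 1 := by rw [hy]; simp
            simp only [List.length_cons] at h
            omega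
          rw [harr, A_repl_cons t.length y hyO ys,
            pvS_false_run t.length (y :: ys) (Or.inr ⟨y, ys, rfl, hyO⟩),
            pvS_cons_ne true y hyO ys, ih ys hys_len]
      · rw [A_cons_ne x hx xs, pvS_cons_ne false x hx xs]
        exact ih xs (by simp at h; omega)

-- ===== VERDICT (by name: the statement is the Claim_ definition above) =====
theorem agent_counter_spec : Claim_equal_agent_counter := by
  intro arr _
  unfold Spec_agent_counter
  rw [alt_eq_sumW, sumW_eq_S, ← A_eq_S arr.length arr le_rfl]
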